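-- pv_equiv track=rewrite | github.com/Frooob/connect_four_minmax | Spiel.py | eval_line
-- ===== SOURCE A (Python) =====
-- from collections import defaultdict
--
-- def eval_line(line):
--     """ Zählt in einer gegebenen Reihe die Anzahl der zusammenhängenden Folgen pro Spieler."""
--     counts = defaultdict(int)
--     last = 0
--     row = 0
--     for value in line:
--         if value != last or value == 0:
--             row = 0
--         elif value > 0:
--             row += 1
--             for r in range(1, row+1):
--                 length = r+1 if r+1 <= 4 else 4
--                 counts[f"{int(last)}_{length}"]+=1
--         last = value
--     return counts
-- ===== SOURCE B (Python) =====
-- def eval_line(line):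
--     """Run-length version: one pass detecting maximal runs, closed-form counts per run."""
--     counts = {}
--
--     def add_run(v, k):
--         if v > 0 and k >= 2:
--             key2 = f"{v}_2"
--             counts[key2] = counts.get(key2, 0) + (k - 1)
--             if k >= 3:
--                 key3 = f"{v}_3"
--                 counts[key3] = counts.get(key3, 0) + (k - 2)
--             if k >= 4:
--                 key4 = f"{v}_4"
--                 counts[key4] = counts.get(key4, 0) + (k - 3) * (k - 2) // 2
--     if not line:
--         return counts
--     v, k = line[0], 1
--     for x in line[1:]:
--         if x == v:
--             k += 1
--         else:
--             add_run(v, k)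
--             v, k = x, 1
--     add_run(v, k)
--     return counts
-- ===== Notes on version B (the rewrite author's own statement) =====
-- stated objective: alternative
-- what changed: B replaces A's per-element inner loop (which re-adds one count per previous run position at every step) by a single pass that detects maximal runs of equal values and adds each run's contributions with closed-form arithmetic (k-1, k-2, (k-3)(k-2)//2).
import Mathlib
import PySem

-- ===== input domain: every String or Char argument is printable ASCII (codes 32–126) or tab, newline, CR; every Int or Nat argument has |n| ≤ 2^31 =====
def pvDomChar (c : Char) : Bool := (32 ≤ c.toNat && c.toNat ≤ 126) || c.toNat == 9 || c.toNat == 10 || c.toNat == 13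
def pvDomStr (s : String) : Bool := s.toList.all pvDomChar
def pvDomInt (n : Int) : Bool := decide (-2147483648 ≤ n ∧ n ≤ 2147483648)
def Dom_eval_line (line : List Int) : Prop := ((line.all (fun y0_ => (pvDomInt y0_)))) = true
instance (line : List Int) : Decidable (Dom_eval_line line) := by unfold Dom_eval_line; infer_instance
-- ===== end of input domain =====

-- B replaces A's per-element inner loop by a single run-detecting pass with closed-form counts per run.

-- ===== PORT A =====
-- key f"{int(last)}_{length}"
def pvKey (v : Int) (length : Int) : String :=
  String.ofList (PySem.Int.toChars v ++ '_' :: PySem.Int.toChars length)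

def evalLineStep (st : PySem.Dict String Int × Int × Int) (value : Int) :
    PySem.Dict String Int × Int × Int :=
  let counts := st.1
  let last := st.2.1
  let row := st.2.2
  if value ≠ last ∨ value = 0 then (counts, value, 0)
  else if 0 < value then
    let row' := row + 1
    ((PySem.List.pyRange 1 (row' + 1) 1).foldl (fun d r =>
        let length := if r + 1 ≤ 4 then r + 1 else 4
        d.modify (pvKey last length) 0 (· + 1)) counts, value, row')
  else (counts, value, row)

def eval_line (line : List Int) : List (String × Int) :=
  (line.foldl evalLineStep (PySem.Dict.empty, 0, 0)).1.items

-- ===== PORT B =====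
def pvBump (counts : PySem.Dict String Int) (key : String) (n : Int) : PySem.Dict String Int :=
  counts.insert key (counts.getD key 0 + n)

def pvAddRun (counts : PySem.Dict String Int) (v : Int) (k : Int) : PySem.Dict String Int :=
  if 0 < v ∧ 2 ≤ k then
    let d1 := pvBump counts (pvKey v 2) (k - 1)
    let d2 := if 3 ≤ k then pvBump d1 (pvKey v 3) (k - 2) else d1
    if 4 ≤ k then pvBump d2 (pvKey v 4) (PySem.Int.floordiv ((k - 3) * (k - 2)) 2) else d2
  else counts

def pvRunsGo : List Int → Int → Int → PySem.Dict String Int → PySem.Dict String Int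
  | [], v, k, counts => pvAddRun counts v k
  | x :: xs, v, k, counts =>
    if x = v then pvRunsGo xs v (k + 1) counts
    else pvRunsGo xs x 1 (pvAddRun counts v k)

def eval_line_alt (line : List Int) : List (String × Int) :=
  match line with
  | [] => []
  | x :: xs => (pvRunsGo xs x 1 PySem.Dict.empty).items

-- ===== PRECONDITION & SPEC =====
def Spec_eval_line (line : List Int) (out : List (String × Int)) : Prop := out = eval_line_alt line
instance (line : List Int) (out : List (String × Int)) : Decidable (Spec_eval_line line out) := by unfold Spec_eval_line; infer_instance

-- ===== CLAIM (what is proved, stated in full; the proofs are below) =====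
def Claim_equal_eval_line : Prop := ∀ (line : List Int), Dom_eval_line line → Spec_eval_line line (eval_line line)

-- ===== LEMMAS AND PROOFS =====

-- key inequality: pvKey v a ≠ pvKey v b when str(a) ≠ str(b)
theorem pvKey_ne (v : Int) {a b : Int} (h : PySem.Int.toChars a ≠ PySem.Int.toChars b) :
    pvKey v a ≠ pvKey v b := by
  intro he
  have hh := List.cons.injEq _ _ _ _ ▸ List.append_cancel_left (String.ofList_inj.mp he)
  exact h hh.2

-- inserts at distinct keys commute when the first key is already present
theorem pv_insert_comm {κ ν : Type} [BEq κ] [LawfulBEq κ] (d : PySem.Dict κ ν) (k k' : κ)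
    (v w : ν) (h : d.contains k = true) (hne : k ≠ k') :
    (d.insert k' w).insert k v = (d.insert k v).insert k' w := by
  apply PySem.Dict.ext
  by_cases h' : d.contains k' = true
  · rw [PySem.Dict.items_insert_of_contains _ v (by simp [PySem.Dict.contains_insert, h]),
        PySem.Dict.items_insert_of_contains _ w h',
        PySem.Dict.items_insert_of_contains _ w (by simp [PySem.Dict.contains_insert, h']),
        PySem.Dict.items_insert_of_contains _ v h]
    rw [List.map_map, List.map_map]
    apply List.map_congr_left
    intro p hp
    simp only [Function.comp_apply]
    by_cases hk : p.1 = k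
    · simp [hk, hne]
    · by_cases hk' : p.1 = k'
      · simp [hk', Ne.symm hne]
      · simp [hk, hk']
  · have h'' : d.contains k' = false := by simpa using h'
    rw [PySem.Dict.items_insert_of_contains _ v (by simp [PySem.Dict.contains_insert, h]),
        PySem.Dict.items_insert_of_not_contains _ w h'',
        PySem.Dict.items_insert_of_not_contains _ w
          (by simp [PySem.Dict.contains_insert, h'', Ne.symm hne]),
        PySem.Dict.items_insert_of_contains _ v h]
    simp [Ne.symm hne]

-- m same-key count increments are one insert of +m
theorem pv_fold_rep (m : Nat) (hm : 1 ≤ m) (d : PySem.Dict String Int) (k : String) :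
    (List.replicate m k).foldl (fun D x => D.insert x (D.getD x 0 + 1)) d
      = d.insert k (d.getD k 0 + m) := by
  induction m generalizing d with
  | zero => omega
  | succ m ih =>
    rcases Nat.eq_zero_or_pos m with hm0 | hm1
    · subst hm0
      simp
    · rw [List.replicate_succ, List.foldl_cons, ih hm1]
      rw [PySem.Dict.getD_insert_self, PySem.Dict.insert_insert_self]
      push_cast
      ring_nf


-- the key sequence A's inner loop touches at run length j
def pvKeyL (v : Int) (j : Nat) : List String :=
  pvKey v 2 :: (if 2 ≤ j then pvKey v 3 :: List.replicate (j - 2) (pvKey v 4) else [])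

theorem pvKeyL_succ (v : Int) (j : Nat) (hj : 2 ≤ j) :
    pvKeyL v (j + 1) = pvKeyL v j ++ [pvKey v 4] := by
  simp only [pvKeyL, if_pos hj, if_pos (by omega : 2 ≤ j + 1)]
  rw [show j + 1 - 2 = (j - 2) + 1 from by omega, List.replicate_succ']
  simp

theorem pv_inner_keys (v : Int) (j : Nat) (hj : 1 ≤ j) (D : PySem.Dict String Int) :
    (PySem.List.pyRange 1 ((j : Int) + 1) 1).foldl (fun d r =>
        let length := if r + 1 ≤ 4 then r + 1 else 4
        d.modify (pvKey v length) 0 (· + 1)) D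
      = (pvKeyL v j).foldl (fun d x => d.modify x 0 (· + 1)) D := by
  induction j generalizing D with
  | zero => omega
  | succ j ih =>
    rcases Nat.eq_zero_or_pos j with hj0 | hj1
    · subst hj0
      have hr : PySem.List.pyRange 1 ((1:Nat) + 1) 1 = [1] := by decide
      norm_num at hr ⊢
      rw [hr]
      simp [pvKeyL]
    · have hcast : ((j + 1 : Nat) : Int) + 1 = ((j : Int) + 1) + 1 := by push_cast; ring
      rw [hcast, PySem.List.pyRange_one_succ_right (by omega : (1:Int) ≤ (j:Int)+1),
          List.foldl_append, ih hj1]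
      rcases Nat.lt_or_ge j 2 with hj1' | hj2
      · have hj' : j = 1 := by omega
        subst hj'
        simp [pvKeyL]
      · rw [pvKeyL_succ v j hj2, List.foldl_append]
        simp only [List.foldl_cons, List.foldl_nil]
        rcases Int.lt_or_le ((j:Int) + 1 + 1) 4 with h | h
        · omega
        · rcases Int.lt_or_le (4:Int) ((j:Int) + 1 + 1) with h2 | h2
          · rw [if_neg (by omega)]
          · rw [if_pos (by omega), show (j:Int) + 1 + 1 = 4 from by omega]

-- one inner pass at row j merges into the closed-form run counts
theorem pv_run (v : Int) (hv : 0 < v) (j : Nat) (hj : 1 ≤ j) (d : PySem.Dict String Int) :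
    (pvKeyL v j).foldl (fun D x => D.modify x 0 (· + 1)) (pvAddRun d v (j : Int))
      = pvAddRun d v ((j : Int) + 1) := by
  have n23 : pvKey v 2 ≠ pvKey v 3 := pvKey_ne v (by decide)
  have n24 : pvKey v 2 ≠ pvKey v 4 := pvKey_ne v (by decide)
  have n34 : pvKey v 3 ≠ pvKey v 4 := pvKey_ne v (by decide)
  rcases Nat.lt_or_ge j 4 with hj4 | hj4
  · interval_cases j
    · -- j = 1
      simp [pvKeyL, pvAddRun, pvBump, PySem.Dict.modify, hv]
    · -- j = 2
      simp [pvKeyL, pvAddRun, pvBump, PySem.Dict.modify, hv, PySem.Dict.getD_insert,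
        PySem.Dict.insert_insert_self, Ne.symm n23]
      ring_nf
    · -- j = 3
      simp only [pvKeyL, pvAddRun, pvBump, PySem.Dict.modify, hv, List.foldl_cons]
      norm_num [PySem.Dict.getD_insert, Ne.symm n23, Ne.symm n24, Ne.symm n34,
        PySem.Dict.insert_insert_self]
      rw [pv_insert_comm _ (pvKey v 2) (pvKey v 3) _ _ (by simp [PySem.Dict.contains_insert]) n23,
        PySem.Dict.insert_insert_self]
      simp only [if_neg n23, PySem.Dict.insert_insert_self]
      ring_nf
  · obtain ⟨m, rfl⟩ : ∃ m, j = m + 4 := ⟨j - 4, by omega⟩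
    have h2 : (2:Int) ≤ ((m + 4 : Nat) : Int) := by push_cast; omega
    have h3 : (3:Int) ≤ ((m + 4 : Nat) : Int) := by push_cast; omega
    have h4 : (4:Int) ≤ ((m + 4 : Nat) : Int) := by push_cast; omega
    simp only [pvKeyL, if_pos (by omega : 2 ≤ m + 4), show m + 4 - 2 = m + 2 from by omega,
      List.foldl_cons]
    simp only [pvAddRun, pvBump, PySem.Dict.modify, if_pos (And.intro hv h2), if_pos h3, if_pos h4,
      PySem.Dict.getD_insert, if_neg (Ne.symm n23), if_neg (Ne.symm n24), if_neg (Ne.symm n34),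
      if_neg n23, if_neg n24, if_neg n34, if_true]
    simp only [if_pos (show (0:Int) < v ∧ 2 ≤ ((m+4:Nat):Int)+1 from ⟨hv, by push_cast; omega⟩),
      if_pos (show (3:Int) ≤ ((m+4:Nat):Int)+1 from by push_cast; omega),
      if_pos (show (4:Int) ≤ ((m+4:Nat):Int)+1 from by push_cast; omega),
      PySem.Dict.getD_insert, if_neg (Ne.symm n23), if_neg (Ne.symm n24), if_neg (Ne.symm n34)]
    rw [pv_insert_comm _ (pvKey v 2) (pvKey v 4) _ _ (by simp [PySem.Dict.contains_insert]) n24]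
    rw [pv_insert_comm _ (pvKey v 2) (pvKey v 3) _ _ (by simp [PySem.Dict.contains_insert]) n23]
    rw [PySem.Dict.insert_insert_self]
    rw [pv_insert_comm _ (pvKey v 3) (pvKey v 4) _ _ (by simp [PySem.Dict.contains_insert]) n34,
      PySem.Dict.insert_insert_self]
    rw [pv_fold_rep (m + 2) (by omega)]
    rw [PySem.Dict.getD_insert_self, PySem.Dict.insert_insert_self]
    have hT : PySem.Int.floordiv ((((m+4:Nat):Int)+1-3)*(((m+4:Nat):Int)+1-2)) 2
        = PySem.Int.floordiv ((((m+4:Nat):Int)-3)*(((m+4:Nat):Int)-2)) 2 + ((m+2:Nat):Int) := by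
      push_cast
      rw [PySem.Int.floordiv_eq_ediv_of_pos (by norm_num), PySem.Int.floordiv_eq_ediv_of_pos (by norm_num)]
      have he : ((m:Int)+4+1-3)*((m:Int)+4+1-2) = ((m:Int)+4-3)*((m:Int)+4-2) + ((m:Int)+2)*2 := by ring
      rw [he, Int.add_mul_ediv_right _ _ (by norm_num : (2:Int) ≠ 0)]
    rw [hT]
    ring_nf

def pvRowOf (v : Int) (j : Nat) : Int := if 0 < v then (j : Int) - 1 else 0

theorem pv_addRun_nonpos (d : PySem.Dict String Int) (v k : Int) (hv : v ≤ 0) :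
    pvAddRun d v k = d := by
  rw [pvAddRun, if_neg]
  rintro ⟨h, -⟩
  omega

theorem pv_addRun_one (d : PySem.Dict String Int) (v : Int) : pvAddRun d v 1 = d := by
  rw [pvAddRun, if_neg]
  rintro ⟨-, h⟩
  omega

theorem pv_rowOf_one (v : Int) : pvRowOf v 1 = 0 := by
  simp [pvRowOf]

theorem pv_main (xs : List Int) (v : Int) (j : Nat) (hj : 1 ≤ j) (d : PySem.Dict String Int) :
    (xs.foldl evalLineStep (pvAddRun d v (j : Int), v, pvRowOf v j)).1
      = pvRunsGo xs v (j : Int) d := by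
  induction xs generalizing v j d with
  | nil => rfl
  | cons x xs ih =>
    rw [List.foldl_cons, pvRunsGo]
    by_cases hxv : x = v
    · subst hxv
      rw [if_pos rfl]
      have hcast : (x : Int) * 0 = 0 := by ring
      rcases lt_trichotomy x 0 with hneg | h0 | hpos
      · -- negative run element: nothing happens
        have hstep : evalLineStep (pvAddRun d x (j : Int), x, pvRowOf x j) x
            = (pvAddRun d x ((j + 1 : Nat) : Int), x, pvRowOf x (j + 1)) := by
          rw [evalLineStep]
          simp only [if_neg (show ¬ (x ≠ x ∨ x = 0) from by simp; omega),
            if_neg (show ¬ (0 < x) from by omega)]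
          rw [pv_addRun_nonpos _ _ _ (le_of_lt hneg), pv_addRun_nonpos _ _ _ (le_of_lt hneg)]
          simp [pvRowOf, show ¬ (0 < x) from by omega]
        rw [hstep, ih x (j + 1) (by omega) d]
        push_cast
        ring_nf
      · -- value 0: row reset, nothing counted
        subst h0
        have hstep : evalLineStep (pvAddRun d 0 (j : Int), 0, pvRowOf 0 j) 0
            = (pvAddRun d 0 ((j + 1 : Nat) : Int), 0, pvRowOf 0 (j + 1)) := by
          rw [evalLineStep]
          simp only [if_pos (show (0:Int) ≠ 0 ∨ (0:Int) = 0 from Or.inr rfl)]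
          rw [pv_addRun_nonpos _ _ _ le_rfl, pv_addRun_nonpos _ _ _ le_rfl]
          simp [pvRowOf]
        rw [hstep, ih 0 (j + 1) (by omega) d]
        push_cast
        ring_nf
      · -- positive run element: one inner pass
        have hstep : evalLineStep (pvAddRun d x (j : Int), x, pvRowOf x j) x
            = (pvAddRun d x ((j + 1 : Nat) : Int), x, pvRowOf x (j + 1)) := by
          rw [evalLineStep]
          simp only [if_neg (show ¬ (x ≠ x ∨ x = 0) from by simp; omega), if_pos hpos]
          have hrow : pvRowOf x j + 1 = (j : Int) := by
            simp only [pvRowOf, if_pos hpos]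
            ring
          rw [hrow]
          rw [pv_inner_keys x j hj, pv_run x hpos j hj d]
          have hrow' : pvRowOf x (j + 1) = (j : Int) := by
            simp only [pvRowOf, if_pos hpos]
            push_cast
            ring
          rw [hrow']
          push_cast
          rfl
        rw [hstep, ih x (j + 1) (by omega) d]
        push_cast
        ring_nf
    · -- run boundary
      rw [if_neg hxv]
      have hstep : evalLineStep (pvAddRun d v (j : Int), v, pvRowOf v j) x
          = (pvAddRun (pvAddRun d v (j : Int)) x 1, x, pvRowOf x 1) := by
        rw [evalLineStep]
        simp only [if_pos (Or.inl hxv)]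
        rw [pv_addRun_one, pv_rowOf_one]
      rw [hstep]
      exact ih x 1 (by omega) (pvAddRun d v (j : Int)) |>.trans (by norm_num)

-- ===== VERDICT (by name: the statement is the Claim_ definition above) =====
theorem eval_line_spec : Claim_equal_eval_line := by
  intro line _
  unfold Spec_eval_line eval_line eval_line_alt
  cases line with
  | nil => rfl
  | cons x xs =>
    rw [List.foldl_cons]
    have hstep : evalLineStep (PySem.Dict.empty, 0, 0) x
        = (pvAddRun PySem.Dict.empty x 1, x, pvRowOf x 1) := by
      rw [evalLineStep]
      simp only [if_pos (show x ≠ (0:Int) ∨ x = 0 from by by_cases h : x = 0; exact Or.inr h; exact Or.inl h)]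
      rw [pv_addRun_one, pv_rowOf_one]
    rw [hstep]
    have := pv_main xs x 1 (by omega) PySem.Dict.empty
    norm_num at this
    rw [this]
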